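-- pv_equiv track=rewrite | github.com/kenadz/szkola | programowanie_plansza_PR_2024.py | licz_mozliwe_pozycje
-- ===== SOURCE A (Python) =====
-- def czy_mozna_umiescic_jednomasztowiec(plansza, wiersz, kolumna):
--     """Sprawdź czy pozycja jest odpowiednia dla umieszczenia jednomasztowca."""
--     # czy komórka pusta (0)
--     if plansza[wiersz][kolumna] != 0:
--         return False
--
--     # sprawdza sąsiednie komórki (boki i ukośne)
--     wiersze, kolumny = len(plansza), len(plansza[0])
--     for dw in [-1, 0, 1]:
--         for dk in [-1, 0, 1]:
--             if dw == 0 and dk == 0: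
--                 continue  # pomija tą samą komórkę
--
--             nw, nk = wiersz + dw, kolumna + dk
--             if 0 <= nw < wiersze and 0 <= nk < kolumny and plansza[nw][nk] == 1:
--                 return False  # sąsiad z innym statkiem - X
--
--     return True
--
-- def licz_mozliwe_pozycje(plansza):
--     """Czy jednomasztowiec"""
--     wiersze, kolumny = len(plansza), len(plansza[0])
--     licznik = 0
--
--     for w in range(wiersze):
--         for k in range(kolumny):
--             if czy_mozna_umiescic_jednomasztowiec(plansza, w, k):
--                 licznik += 1
--
--     return licznik
-- ===== SOURCE B (Python) =====
-- def licz_mozliwe_pozycje(plansza):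
--     """Czy jednomasztowiec"""
--     wiersze, kolumny = len(plansza), len(plansza[0])
--     blocked = set()
--     for w in range(wiersze):
--         for k in range(kolumny):
--             if plansza[w][k] == 1:
--                 for nw in range(max(0, w - 1), min(wiersze, w + 2)):
--                     for nk in range(max(0, k - 1), min(kolumny, k + 2)):
--                         blocked.add((nw, nk))
--     licznik = 0
--     for w in range(wiersze):
--         for k in range(kolumny):
--             if plansza[w][k] == 0 and (w, k) not in blocked:
--                 licznik += 1
--     return licznik
-- ===== Notes on version B (the rewrite author's own statement) =====
-- stated objective: alternative
-- what changed: Inverted gather to scatter: instead of scanning all 8 neighbours of every empty cell, B makes one pass that collects the set of cells adjacent to any ship, then counts empty cells not in that set.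
import Mathlib
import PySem

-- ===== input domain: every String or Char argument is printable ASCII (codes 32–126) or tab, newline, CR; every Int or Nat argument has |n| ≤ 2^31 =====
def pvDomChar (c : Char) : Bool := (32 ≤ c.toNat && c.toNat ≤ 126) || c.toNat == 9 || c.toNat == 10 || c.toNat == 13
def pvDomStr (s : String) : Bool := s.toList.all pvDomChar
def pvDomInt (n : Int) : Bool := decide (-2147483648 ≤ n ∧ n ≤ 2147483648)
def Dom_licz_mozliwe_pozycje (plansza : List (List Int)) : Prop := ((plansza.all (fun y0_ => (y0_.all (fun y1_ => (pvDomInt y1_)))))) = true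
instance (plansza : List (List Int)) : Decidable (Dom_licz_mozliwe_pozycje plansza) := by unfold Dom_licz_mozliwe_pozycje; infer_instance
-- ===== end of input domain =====

-- B replaces A's per-empty-cell neighbour scan (gather) by a single scatter pass that collects
-- the set of cells adjacent to some ship, then counts unblocked empty cells (objective: alternative).

-- shared indexing helper: plansza[w][k]; exact under Pre_ (all indices read are in range there)
def pvGet2 (plansza : List (List Int)) (w k : Int) : Int :=
  PySem.List.pyGetD (PySem.List.pyGetD plansza w []) k 0

-- ===== PORT A =====
def czy_mozna_umiescic_jednomasztowiec (plansza : List (List Int)) (wiersz kolumna : Int) : Bool :=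
  if pvGet2 plansza wiersz kolumna ≠ 0 then false
  else
    let wiersze : Int := plansza.length
    -- len(plansza[0]); exact under Pre_ (plansza nonempty)
    let kolumny : Int := (PySem.List.pyGetD plansza 0 []).length
    -- the early-return-False double loop over offsets is ported as List.any
    if ([-1, 0, 1] : List Int).any (fun dw =>
        ([-1, 0, 1] : List Int).any (fun dk =>
          if dw == 0 && dk == 0 then false
          else
            let nw := wiersz + dw
            let nk := kolumna + dk
            decide (0 ≤ nw) && decide (nw < wiersze) && decide (0 ≤ nk) && decide (nk < kolumny)
              && (pvGet2 plansza nw nk == 1)))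
    then false else true

def licz_mozliwe_pozycje (plansza : List (List Int)) : Int :=
  let wiersze : Int := plansza.length
  let kolumny : Int := (PySem.List.pyGetD plansza 0 []).length
  (PySem.List.pyRange 0 wiersze 1).foldl (fun licznik w =>
    (PySem.List.pyRange 0 kolumny 1).foldl (fun licznik k =>
      if czy_mozna_umiescic_jednomasztowiec plansza w k then licznik + 1 else licznik)
      licznik) 0

-- ===== PORT B =====
def licz_mozliwe_pozycje_alt (plansza : List (List Int)) : Int :=
  let wiersze : Int := plansza.length
  let kolumny : Int := (PySem.List.pyGetD plansza 0 []).length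
  let blocked : PySem.Set (Int × Int) :=
    (PySem.List.pyRange 0 wiersze 1).foldl (fun b w =>
      (PySem.List.pyRange 0 kolumny 1).foldl (fun b k =>
        if pvGet2 plansza w k == 1 then
          (PySem.List.pyRange (max 0 (w - 1)) (min wiersze (w + 2)) 1).foldl (fun b nw =>
            (PySem.List.pyRange (max 0 (k - 1)) (min kolumny (k + 2)) 1).foldl (fun b nk =>
              PySem.Set.add b (nw, nk)) b) b
        else b) b) PySem.Set.empty
  (PySem.List.pyRange 0 wiersze 1).foldl (fun licznik w =>
    (PySem.List.pyRange 0 kolumny 1).foldl (fun licznik k =>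
      if pvGet2 plansza w k == 0 && !(PySem.Set.contains blocked (w, k)) then licznik + 1
      else licznik) licznik) 0

-- ===== PRECONDITION & SPEC =====
-- Pre_ excludes exactly the inputs on which Python A raises IndexError: the empty grid
-- (len(plansza[0])) and grids with a row shorter than the first row (plansza[w][k] read).
def Pre_licz_mozliwe_pozycje (plansza : List (List Int)) : Prop :=
  plansza ≠ [] ∧ ∀ row ∈ plansza, (plansza.headD []).length ≤ row.length
instance (plansza : List (List Int)) : Decidable (Pre_licz_mozliwe_pozycje plansza) := by
  unfold Pre_licz_mozliwe_pozycje; infer_instance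
def pvWitness_licz_mozliwe_pozycje : List (List Int) := [[0, 1], [0, 0]]

def Spec_licz_mozliwe_pozycje (plansza : List (List Int)) (out : Int) : Prop := out = licz_mozliwe_pozycje_alt plansza
instance (plansza : List (List Int)) (out : Int) : Decidable (Spec_licz_mozliwe_pozycje plansza out) := by unfold Spec_licz_mozliwe_pozycje; infer_instance

-- ===== CLAIM (what is proved, stated in full; the proofs are below) =====
def Claim_equal_licz_mozliwe_pozycje : Prop := ∀ (plansza : List (List Int)), Dom_licz_mozliwe_pozycje plansza → Pre_licz_mozliwe_pozycje plansza → Spec_licz_mozliwe_pozycje plansza (licz_mozliwe_pozycje plansza)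

-- ===== LEMMAS AND PROOFS =====

-- membership after the innermost add-loop
lemma mem_foldl_add_row (L : List Int) (b : PySem.Set (Int × Int)) (nw : Int) (p : Int × Int) :
    p ∈ L.foldl (fun b nk => PySem.Set.add b (nw, nk)) b ↔ p ∈ b ∨ (p.1 = nw ∧ p.2 ∈ L) := by
  induction L generalizing b with
  | nil => simp
  | cons x xs ih =>
    simp only [List.foldl_cons, ih, PySem.Set.mem_add, List.mem_cons]
    constructor
    · rintro ((h | h) | h)
      · exact Or.inl h
      · exact Or.inr ⟨(congrArg Prod.fst h), Or.inl (congrArg Prod.snd h)⟩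
      · exact Or.inr ⟨h.1, Or.inr h.2⟩
    · rintro (h | ⟨h1, (h2 | h2)⟩)
      · exact Or.inl (Or.inl h)
      · exact Or.inl (Or.inr (Prod.ext h1 h2))
      · exact Or.inr ⟨h1, h2⟩

-- membership after the rectangle double loop
lemma mem_foldl_add_rect (Lw Lk : List Int) (b : PySem.Set (Int × Int)) (p : Int × Int) :
    p ∈ Lw.foldl (fun b nw => Lk.foldl (fun b nk => PySem.Set.add b (nw, nk)) b) b ↔
      p ∈ b ∨ (p.1 ∈ Lw ∧ p.2 ∈ Lk) := by
  induction Lw generalizing b with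
  | nil => simp
  | cons x xs ih =>
    simp only [List.foldl_cons, ih, mem_foldl_add_row, List.mem_cons]
    tauto

-- membership after the inner ship-scan loop (fixed row w)
lemma mem_foldl_ship_row (plansza : List (List Int)) (wiersze kolumny : Int) (Lk : List Int)
    (b : PySem.Set (Int × Int)) (w : Int) (p : Int × Int) :
    p ∈ Lk.foldl (fun b k =>
        if pvGet2 plansza w k == 1 then
          (PySem.List.pyRange (max 0 (w - 1)) (min wiersze (w + 2)) 1).foldl (fun b nw =>
            (PySem.List.pyRange (max 0 (k - 1)) (min kolumny (k + 2)) 1).foldl (fun b nk =>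
              PySem.Set.add b (nw, nk)) b) b
        else b) b ↔
      p ∈ b ∨ ∃ k ∈ Lk, pvGet2 plansza w k = 1 ∧
        p.1 ∈ PySem.List.pyRange (max 0 (w - 1)) (min wiersze (w + 2)) 1 ∧
        p.2 ∈ PySem.List.pyRange (max 0 (k - 1)) (min kolumny (k + 2)) 1 := by
  induction Lk generalizing b with
  | nil => simp
  | cons x xs ih =>
    simp only [List.foldl_cons]
    by_cases hx : pvGet2 plansza w x = 1
    · rw [if_pos (by simp [hx])]
      simp only [ih, mem_foldl_add_rect, List.mem_cons]
      constructor
      · rintro ((h | h) | ⟨k, hk, h⟩)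
        · exact Or.inl h
        · exact Or.inr ⟨x, Or.inl rfl, hx, h.1, h.2⟩
        · exact Or.inr ⟨k, Or.inr hk, h⟩
      · rintro (h | ⟨k, (rfl | hk), h⟩)
        · exact Or.inl (Or.inl h)
        · exact Or.inl (Or.inr ⟨h.2.1, h.2.2⟩)
        · exact Or.inr ⟨k, hk, h⟩
    · rw [if_neg (by simp [hx])]
      simp only [ih, List.mem_cons]
      constructor
      · rintro (h | ⟨k, hk, h⟩)
        · exact Or.inl h
        · exact Or.inr ⟨k, Or.inr hk, h⟩
      · rintro (h | ⟨k, (rfl | hk), h⟩)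
        · exact Or.inl h
        · exact absurd h.1 hx
        · exact Or.inr ⟨k, hk, h⟩

-- membership in the finished blocked set
lemma mem_blocked (plansza : List (List Int)) (wiersze kolumny : Int) (Lw : List Int)
    (b : PySem.Set (Int × Int)) (p : Int × Int) :
    p ∈ Lw.foldl (fun b w =>
        (PySem.List.pyRange 0 kolumny 1).foldl (fun b k =>
          if pvGet2 plansza w k == 1 then
            (PySem.List.pyRange (max 0 (w - 1)) (min wiersze (w + 2)) 1).foldl (fun b nw =>
              (PySem.List.pyRange (max 0 (k - 1)) (min kolumny (k + 2)) 1).foldl (fun b nk =>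
                PySem.Set.add b (nw, nk)) b) b
          else b) b) b ↔
      p ∈ b ∨ ∃ w ∈ Lw, ∃ k ∈ PySem.List.pyRange 0 kolumny 1, pvGet2 plansza w k = 1 ∧
        p.1 ∈ PySem.List.pyRange (max 0 (w - 1)) (min wiersze (w + 2)) 1 ∧
        p.2 ∈ PySem.List.pyRange (max 0 (k - 1)) (min kolumny (k + 2)) 1 := by
  induction Lw generalizing b with
  | nil => simp
  | cons x xs ih =>
    simp only [List.foldl_cons, ih, mem_foldl_ship_row, List.mem_cons]
    constructor
    · rintro ((h | ⟨k, hk, h⟩) | ⟨w, hw, h⟩)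
      · exact Or.inl h
      · exact Or.inr ⟨x, Or.inl rfl, k, hk, h⟩
      · exact Or.inr ⟨w, Or.inr hw, h⟩
    · rintro (h | ⟨w, (rfl | hw), h⟩)
      · exact Or.inl (Or.inl h)
      · exact Or.inl (Or.inr h)
      · exact Or.inr ⟨w, hw, h⟩

-- the gather scan and the scatter region describe the same neighbourhood relation
lemma scan_iff (plansza : List (List Int)) (R C w k : Int)
    (hw0 : 0 ≤ w) (hw1 : w < R) (hk0 : 0 ≤ k) (hk1 : k < C)
    (hv : pvGet2 plansza w k = 0) :
    (([-1, 0, 1] : List Int).any (fun dw =>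
        ([-1, 0, 1] : List Int).any (fun dk =>
          if dw == 0 && dk == 0 then false
          else
            decide (0 ≤ w + dw) && decide (w + dw < R) && decide (0 ≤ k + dk) && decide (k + dk < C)
              && (pvGet2 plansza (w + dw) (k + dk) == 1))) = true) ↔
      ∃ w' ∈ PySem.List.pyRange 0 R 1, ∃ k' ∈ PySem.List.pyRange 0 C 1,
        pvGet2 plansza w' k' = 1 ∧
        w ∈ PySem.List.pyRange (max 0 (w' - 1)) (min R (w' + 2)) 1 ∧
        k ∈ PySem.List.pyRange (max 0 (k' - 1)) (min C (k' + 2)) 1 := by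
  simp only [List.any_eq_true, PySem.List.mem_pyRange_one]
  constructor
  · rintro ⟨dw, hdw, dk, hdk, hc⟩
    have hdw' : dw = -1 ∨ dw = 0 ∨ dw = 1 := by simpa using hdw
    have hdk' : dk = -1 ∨ dk = 0 ∨ dk = 1 := by simpa using hdk
    by_cases hz : dw = 0 ∧ dk = 0
    · rw [if_pos (by simp [hz.1, hz.2])] at hc
      exact absurd hc (by simp)
    · rw [if_neg (by simp only [Bool.and_eq_true, beq_iff_eq]; exact hz)] at hc
      simp only [Bool.and_eq_true, decide_eq_true_eq, beq_iff_eq] at hc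
      obtain ⟨⟨⟨⟨h1, h2⟩, h3⟩, h4⟩, hship⟩ := hc
      exact ⟨w + dw, ⟨h1, h2⟩, k + dk, ⟨h3, h4⟩, hship, by omega, by omega⟩
  · rintro ⟨w', ⟨hw'0, hw'1⟩, k', ⟨hk'0, hk'1⟩, hship, ⟨hr1, hr2⟩, ⟨hr3, hr4⟩⟩
    refine ⟨w' - w, by simp; omega, k' - k, by simp; omega, ?_⟩
    by_cases hz : w' - w = 0 ∧ k' - k = 0
    · exfalso
      have hw'' : w' = w := by omega
      have hk'' : k' = k := by omega
      rw [hw'', hk''] at hship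
      exact absurd hship (by simp [hv])
    · rw [if_neg (by simp only [Bool.and_eq_true, beq_iff_eq]; exact hz)]
      have e1 : w + (w' - w) = w' := by ring
      have e2 : k + (k' - k) = k' := by ring
      simp only [Bool.and_eq_true, decide_eq_true_eq, beq_iff_eq, e1, e2]
      exact ⟨⟨⟨⟨by omega, by omega⟩, by omega⟩, by omega⟩, hship⟩

-- pointwise: A's per-cell test equals B's per-cell test
lemma cell_eq (plansza : List (List Int)) (w k : Int)
    (hw0 : 0 ≤ w) (hw1 : w < (plansza.length : Int))
    (hk0 : 0 ≤ k) (hk1 : k < ((PySem.List.pyGetD plansza 0 []).length : Int)) :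
    czy_mozna_umiescic_jednomasztowiec plansza w k =
      (pvGet2 plansza w k == 0 &&
        !(PySem.Set.contains
          ((PySem.List.pyRange 0 (plansza.length : Int) 1).foldl (fun b w =>
            (PySem.List.pyRange 0 ((PySem.List.pyGetD plansza 0 []).length : Int) 1).foldl (fun b k =>
              if pvGet2 plansza w k == 1 then
                (PySem.List.pyRange (max 0 (w - 1)) (min (plansza.length : Int) (w + 2)) 1).foldl (fun b nw =>
                  (PySem.List.pyRange (max 0 (k - 1)) (min ((PySem.List.pyGetD plansza 0 []).length : Int) (k + 2)) 1).foldl (fun b nk =>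
                    PySem.Set.add b (nw, nk)) b) b
              else b) b) PySem.Set.empty)
          (w, k))) := by
  by_cases hv : pvGet2 plansza w k = 0
  · have hA : czy_mozna_umiescic_jednomasztowiec plansza w k =
        !(([-1, 0, 1] : List Int).any (fun dw =>
          ([-1, 0, 1] : List Int).any (fun dk =>
            if dw == 0 && dk == 0 then false
            else
              decide (0 ≤ w + dw) && decide (w + dw < (plansza.length : Int)) &&
                decide (0 ≤ k + dk) && decide (k + dk < ((PySem.List.pyGetD plansza 0 []).length : Int))
                && (pvGet2 plansza (w + dw) (k + dk) == 1)))) := by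
      rw [czy_mozna_umiescic_jednomasztowiec]
      rw [if_neg (by simp [hv])]
      dsimp only
      split
      · next h => rw [h]; rfl
      · next h => rw [Bool.not_eq_true] at h; rw [h]; rfl
    rw [hA]
    have hv' : (pvGet2 plansza w k == 0) = true := by simp [hv]
    rw [hv', Bool.true_and, Bool.eq_iff_iff]
    simp only [Bool.not_eq_true', ← Bool.not_eq_true]
    apply not_congr
    rw [PySem.Set.contains_iff, mem_blocked]
    simp only [PySem.Set.empty, List.not_mem_nil, false_or]
    exact scan_iff plansza _ _ w k hw0 hw1 hk0 hk1 hv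
  · rw [czy_mozna_umiescic_jednomasztowiec]
    rw [if_pos (by simp [hv])]
    simp [hv]

-- ===== VERDICT (by name: the statement is the Claim_ definition above) =====
theorem licz_mozliwe_pozycje_spec : Claim_equal_licz_mozliwe_pozycje := by
  intro plansza _ _
  show licz_mozliwe_pozycje plansza = licz_mozliwe_pozycje_alt plansza
  rw [licz_mozliwe_pozycje, licz_mozliwe_pozycje_alt]
  apply PySem.List.foldl_congr_mem
  intro acc w hw
  apply PySem.List.foldl_congr_mem
  intro acc' k hk
  have hw' := (PySem.List.mem_pyRange_one).1 hw
  have hk' := (PySem.List.mem_pyRange_one).1 hk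
  rw [cell_eq plansza w k hw'.1 hw'.2 hk'.1 hk'.2]
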